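-- pv_equiv track=rewrite | github.com/samar2788/codwars-katas | wordvalues.py | name_value
-- ===== SOURCE A (Python) =====
-- from string import ascii_lowercase
--
-- def name_value(a):
--     l = {}
--     s = 0
--     cl = []
--     fl = []
--
--     for i, j in enumerate(ascii_lowercase):
--         l[j] = i+1
--
--     for i in a:
--         for j in i:
--             for key, val in l.items():
--                 if j == key:
--                     s += val
--         cl.append(s)
--         s = 0
--
--     for i in range(len(cl)):
--         b = (i+1)*cl[i]
--         fl.append(b)
--     return fl
-- ===== SOURCE B (Python) =====
-- from string import ascii_lowercase
--
-- def name_value(a):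
--     out = []
--     i = len(a)
--     for w in reversed(a):
--         cnt = {}
--         for ch in w:
--             cnt[ch] = cnt.get(ch, 0) + 1
--         out.append(i * sum((k + 1) * cnt.get(c, 0) for k, c in enumerate(ascii_lowercase)))
--         i -= 1
--     out.reverse()
--     return out
-- ===== Notes on version B (the rewrite author's own statement) =====
-- stated objective: alternative
-- what changed: B walks the word list back-to-front with a countdown index and reverses the output, and per word builds a character-frequency dict in one pass then takes one weighted pass over the alphabet (position * frequency), instead of A's letter-value dict scanned item-by-item for every character plus an intermediate sum list and a separate scaling loop.
import Mathlib
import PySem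

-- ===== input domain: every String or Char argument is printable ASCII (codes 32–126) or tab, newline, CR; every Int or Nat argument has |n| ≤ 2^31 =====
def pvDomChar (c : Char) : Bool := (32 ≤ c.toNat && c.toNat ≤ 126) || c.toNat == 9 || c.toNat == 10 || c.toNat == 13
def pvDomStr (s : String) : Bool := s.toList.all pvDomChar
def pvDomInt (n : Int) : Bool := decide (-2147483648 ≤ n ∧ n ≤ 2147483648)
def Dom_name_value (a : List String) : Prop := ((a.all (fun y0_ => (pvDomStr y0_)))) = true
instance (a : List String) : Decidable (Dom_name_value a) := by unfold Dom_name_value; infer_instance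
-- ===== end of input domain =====

-- B walks the word list back-to-front with a countdown index, builds a per-word character-frequency
-- dict and takes one weighted pass over the alphabet, then reverses the output — instead of A's
-- per-character scan of a letter-value dict plus two staged lists (objective: alternative).

-- ===== PORT A =====
def pyAsciiLowercase : List Char := "abcdefghijklmnopqrstuvwxyz".toList

def name_value (a : List String) : List Int :=
  -- l = {}; for i, j in enumerate(ascii_lowercase): l[j] = i+1
  let l : PySem.Dict Char Int :=
    (PySem.List.enumerate pyAsciiLowercase).foldl
      (fun d ij => d.insert ij.2 (ij.1 + 1)) PySem.Dict.empty
  -- for i in a: for j in i: for key, val in l.items(): if j == key: s += val; cl.append(s); s = 0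
  let scl : Int × List Int :=
    a.foldl
      (fun scl i =>
        let s := i.toList.foldl
          (fun s j => l.items.foldl (fun s kv => if j == kv.1 then s + kv.2 else s) s)
          scl.1
        (0, scl.2 ++ [s]))
      (0, [])
  let cl := scl.2
  -- for i in range(len(cl)): fl.append((i+1)*cl[i])
  (PySem.List.pyRange 0 cl.length 1).foldl
    (fun fl i => fl ++ [(i + 1) * PySem.List.pyGetD cl i 0]) []

-- ===== PORT B =====
-- cnt = {}; for ch in ws[0]: cnt[ch] = cnt.get(ch, 0) + 1
-- v = sum((k + 1) * cnt.get(c, 0) for k, c in enumerate(ascii_lowercase))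
def pvWordValue (w : String) : Int :=
  let cnt : PySem.Dict Char Int :=
    w.toList.foldl (fun d ch => d.insert ch (d.getD ch 0 + 1)) PySem.Dict.empty
  (PySem.List.enumerate pyAsciiLowercase).foldl
    (fun s kc => s + (kc.1 + 1) * cnt.getD kc.2 0) 0

-- out = []; i = len(a); for w in reversed(a): ... out.append(i * v); i -= 1; out.reverse()
def name_value_alt (a : List String) : List Int :=
  (a.reverse.foldl
    (fun (st : Int × List Int) w => (st.1 - 1, st.2 ++ [st.1 * pvWordValue w]))
    ((a.length : Int), [])).2.reverse

-- ===== PRECONDITION & SPEC =====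
def Spec_name_value (a : List String) (out : List Int) : Prop := out = name_value_alt a
instance (a : List String) (out : List Int) : Decidable (Spec_name_value a out) := by unfold Spec_name_value; infer_instance

-- ===== CLAIM (what is proved, stated in full; the proofs are below) =====
def Claim_equal_name_value : Prop := ∀ (a : List String), Dom_name_value a → Spec_name_value a (name_value a)

-- ===== LEMMAS AND PROOFS =====

def letterVal (c : Char) : Int :=
  if 97 ≤ c.toNat ∧ c.toNat ≤ 122 then (c.toNat : Int) - 96 else 0

def dictItems : List (Char × Int) := [('a', (1 : Int)), ('b', (2 : Int)), ('c', (3 : Int)), ('d', (4 : Int)), ('e', (5 : Int)), ('f', (6 : Int)), ('g', (7 : Int)), ('h', (8 : Int)), ('i', (9 : Int)), ('j', (10 : Int)), ('k', (11 : Int)), ('l', (12 : Int)), ('m', (13 : Int)), ('n', (14 : Int)), ('o', (15 : Int)), ('p', (16 : Int)), ('q', (17 : Int)), ('r', (18 : Int)), ('s', (19 : Int)), ('t', (20 : Int)), ('u', (21 : Int)), ('v', (22 : Int)), ('w', (23 : Int)), ('x', (24 : Int)), ('y', (25 : Int)), ('z', (26 : Int))]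

def wsum (w : String) : Int := w.toList.foldl (fun s c => s + letterVal c) 0

-- the dict A builds has exactly these items, in insertion order
lemma dict_items_eq :
    ((PySem.List.enumerate pyAsciiLowercase).foldl
      (fun d ij => d.insert ij.2 (ij.1 + 1)) (PySem.Dict.empty : PySem.Dict Char Int)).items
    = dictItems := by decide

lemma char_beq_toNat (j c : Char) : (j == c) = (j.toNat == c.toNat) := by
  by_cases h : j = c
  · subst h; simp
  · have hn : j.toNat ≠ c.toNat := by
      intro hn
      exact h (Char.ext (UInt32.toNat_inj.mp hn))
    simp [h, hn]

def dictItemsN : List (Nat × Int) := [(97, (1 : Int)), (98, (2 : Int)), (99, (3 : Int)), (100, (4 : Int)), (101, (5 : Int)), (102, (6 : Int)), (103, (7 : Int)), (104, (8 : Int)), (105, (9 : Int)), (106, (10 : Int)), (107, (11 : Int)), (108, (12 : Int)), (109, (13 : Int)), (110, (14 : Int)), (111, (15 : Int)), (112, (16 : Int)), (113, (17 : Int)), (114, (18 : Int)), (115, (19 : Int)), (116, (20 : Int)), (117, (21 : Int)), (118, (22 : Int)), (119, (23 : Int)), (120, (24 : Int)), (121, (25 : Int)), (122, (26 : Int))]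

lemma dictItemsN_eq : dictItems.map (fun kv => (kv.1.toNat, kv.2)) = dictItemsN := by decide

lemma scan_notmem (n : Nat) :
    ∀ (items : List (Nat × Int)) (s : Int), (∀ kv ∈ items, n ≠ kv.1) →
      items.foldl (fun s kv => if n == kv.1 then s + kv.2 else s) s = s := by
  intro items
  induction items with
  | nil => intro s _; rfl
  | cons kv rest ih =>
    intro s h
    have h1 : n ≠ kv.1 := h kv (List.mem_cons_self)
    simp only [List.foldl_cons, beq_iff_eq, if_neg h1]
    simpa using ih s (fun p hp => h p (List.mem_cons_of_mem kv hp))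

set_option maxHeartbeats 1000000 in
lemma nat_scan (n : Nat) (s : Int) :
    dictItemsN.foldl (fun s kv => if n == kv.1 then s + kv.2 else s) s
      = s + (if 97 ≤ n ∧ n ≤ 122 then (n : Int) - 96 else 0) := by
  by_cases hr : 97 ≤ n ∧ n ≤ 122
  · obtain ⟨h1, h2⟩ := hr
    interval_cases n <;> simp [dictItemsN]
  · have hb : ∀ kv ∈ dictItemsN, 97 ≤ kv.1 ∧ kv.1 ≤ 122 := by decide
    rw [scan_notmem n dictItemsN s (fun kv hkv => by have := hb kv hkv; omega)]
    simp [hr]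

-- A's inner scan over the dict items adds exactly the letter value of j
lemma inner_items (j : Char) (s : Int) :
    dictItems.foldl (fun s kv => if j == kv.1 then s + kv.2 else s) s = s + letterVal j := by
  have h : dictItems.foldl (fun s kv => if j == kv.1 then s + kv.2 else s) s
      = (dictItems.map (fun kv => (kv.1.toNat, kv.2))).foldl
          (fun s kv => if j.toNat == kv.1 then s + kv.2 else s) s := by
    rw [List.foldl_map]
    simp only [char_beq_toNat]
  rw [h, dictItemsN_eq, nat_scan, letterVal]

lemma inner_fun_eq :
    (fun (s : Int) (j : Char) =>
        dictItems.foldl (fun s kv => if j == kv.1 then s + kv.2 else s) s)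
    = fun (s : Int) (j : Char) => s + letterVal j :=
  funext fun s => funext fun j => inner_items j s

-- A's word loop keeps s = 0 between words and appends each word's letter sum
lemma outer_loop : ∀ (a : List String) (acc : List Int),
    a.foldl (fun (scl : Int × List Int) i =>
        (0, scl.2 ++ [i.toList.foldl (fun s c => s + letterVal c) scl.1])) ((0 : Int), acc)
      = (0, acc ++ a.map wsum) := by
  intro a
  induction a with
  | nil => intro acc; simp
  | cons x xs ih =>
    intro acc
    simp only [List.foldl_cons, List.map_cons]
    rw [ih]
    simp [wsum]

-- A's final range loop is a map over the enumerated letter sums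
lemma final_loop (cl : List Int) :
    (PySem.List.pyRange 0 cl.length 1).foldl
        (fun fl i => fl ++ [(i + 1) * PySem.List.pyGetD cl i 0]) []
      = (PySem.List.enumerate cl).map (fun p => (p.1 + 1) * p.2) := by
  rw [PySem.List.foldl_append_singleton_eq_map]
  rw [PySem.List.enumerate_eq_map_pyRange cl 0]
  simp [List.map_map, Function.comp]

-- so A is: map position-scaling over the per-word letter sums
lemma a_char (a : List String) :
    name_value a = (PySem.List.enumerate (a.map wsum)).map (fun p => (p.1 + 1) * p.2) := by
  unfold name_value
  simp only [dict_items_eq, inner_fun_eq]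
  rw [outer_loop a []]
  simp only [List.nil_append]
  rw [final_loop (a.map wsum)]

-- B side: summing-fold is a map-sum
lemma foldl_add_map {α : Type} (f : α → Int) :
    ∀ (l : List α) (s : Int), l.foldl (fun s x => s + f x) s = s + (l.map f).sum := by
  intro l
  induction l with
  | nil => intro s; simp
  | cons x xs ih => intro s; simp [ih, add_assoc]

-- the 0/1 weighted sum over the alphabet of a single char is its letter value
set_option maxHeartbeats 1000000 in
lemma single_char_sum (x : Char) :
    ((PySem.List.enumerate pyAsciiLowercase).map
        (fun kc => (kc.1 + 1) * (if x == kc.2 then (1 : Int) else 0))).sum = letterVal x := by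
  have h : ((PySem.List.enumerate pyAsciiLowercase).map
        (fun kc => (kc.1 + 1) * (if x == kc.2 then (1 : Int) else 0)))
      = (PySem.List.enumerate pyAsciiLowercase).map
        (fun kc => (kc.1 + 1) * (if x.toNat == kc.2.toNat then (1 : Int) else 0)) := by
    simp only [char_beq_toNat]
  rw [h, letterVal]
  by_cases hr : 97 ≤ x.toNat ∧ x.toNat ≤ 122
  · obtain ⟨h1, h2⟩ := hr
    interval_cases hx : x.toNat <;> simp_all [pyAsciiLowercase]
  · have hb : (PySem.List.enumerate pyAsciiLowercase).all
        (fun kc => 97 ≤ kc.2.toNat ∧ kc.2.toNat ≤ 122) = true := by decide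
    rw [if_neg hr]
    have : ∀ kc ∈ PySem.List.enumerate pyAsciiLowercase,
        (kc.1 + 1) * (if x.toNat == kc.2.toNat then (1 : Int) else 0) = 0 := by
      intro kc hkc
      have := List.all_eq_true.mp hb kc hkc
      have hx : x.toNat ≠ kc.2.toNat := by
        simp only [decide_eq_true_eq] at this; omega
      simp [hx]
    rw [List.map_congr_left this]
    simp

-- B's per-word value (weighted counter sum over the alphabet) is the letter sum
lemma word_value_eq (w : String) : pvWordValue w = wsum w := by
  unfold pvWordValue
  simp only [PySem.Dict.getD_foldl_insert_add_one]
  rw [show (List.foldl (fun (s : Int) (kc : Int × Char) => s + (kc.1 + 1) *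
        ((PySem.Dict.empty : PySem.Dict Char Int).getD kc.2 0 + (w.toList.count kc.2 : Int)))
        0 (PySem.List.enumerate pyAsciiLowercase))
      = ((PySem.List.enumerate pyAsciiLowercase).map (fun kc => (kc.1 + 1) *
        ((PySem.Dict.empty : PySem.Dict Char Int).getD kc.2 0 + (w.toList.count kc.2 : Int)))).sum
      from by simpa using foldl_add_map _ (PySem.List.enumerate pyAsciiLowercase) 0]
  simp only [PySem.Dict.getD_empty, zero_add]
  suffices h : ∀ l : List Char,
      ((PySem.List.enumerate pyAsciiLowercase).map
        (fun kc => (kc.1 + 1) * (l.count kc.2 : Int))).sum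
      = l.foldl (fun s c => s + letterVal c) 0 by
    simpa [wsum] using h w.toList
  intro l
  induction l with
  | nil => decide
  | cons x xs ih =>
    have hsplit : ∀ kc : Int × Char,
        ((kc.1 + 1) * (((x :: xs).count kc.2 : Nat) : Int))
          = (kc.1 + 1) * (xs.count kc.2 : Int)
            + (kc.1 + 1) * (if x == kc.2 then (1 : Int) else 0) := by
      intro kc
      rw [List.count_cons]
      by_cases hx : x == kc.2 <;> · simp [hx]; try ring
    calc ((PySem.List.enumerate pyAsciiLowercase).map
            (fun kc => (kc.1 + 1) * ((x :: xs).count kc.2 : Int))).sum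
        = ((PySem.List.enumerate pyAsciiLowercase).map
            (fun kc => (kc.1 + 1) * (xs.count kc.2 : Int)
              + (kc.1 + 1) * (if x == kc.2 then (1 : Int) else 0))).sum := by
          exact congrArg _ (List.map_congr_left (fun kc _ => hsplit kc))
      _ = ((PySem.List.enumerate pyAsciiLowercase).map
            (fun kc => (kc.1 + 1) * (xs.count kc.2 : Int))).sum
          + ((PySem.List.enumerate pyAsciiLowercase).map
            (fun kc => (kc.1 + 1) * (if x == kc.2 then (1 : Int) else 0))).sum := by
          rw [← List.sum_map_add]
      _ = (x :: xs).foldl (fun s c => s + letterVal c) 0 := by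
          rw [ih, single_char_sum]
          simp only [List.foldl_cons, zero_add]
          rw [foldl_add_map letterVal xs 0, foldl_add_map letterVal xs (letterVal x)]
          ring

-- B's countdown loop appends (i - position) * word value over the traversed list
lemma rev_loop : ∀ (l : List String) (i s : Int) (acc : List Int),
    (l.foldl (fun (st : Int × List Int) w => (st.1 - 1, st.2 ++ [st.1 * pvWordValue w]))
        (i, acc)).2
      = acc ++ (PySem.List.enumerate l s).map (fun p => (i + s - p.1) * pvWordValue p.2) := by
  intro l
  induction l with
  | nil => intro i s acc; simp [PySem.List.enumerate_nil]
  | cons w rest ih =>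
    intro i s acc
    simp only [List.foldl_cons, PySem.List.enumerate_cons, List.map_cons]
    rw [ih (i - 1) (s + 1) (acc ++ [i * pvWordValue w])]
    have h : ∀ p : Int × String, (i - 1 + (s + 1) - p.1) = (i + s - p.1) := by intro p; ring
    simp only [h]
    simp

-- reversing the countdown output is the forward position-scaled map
lemma rev_map_eq (a : List String) :
    ((PySem.List.enumerate a.reverse 0).map
        (fun p => ((a.length : Int) - p.1) * pvWordValue p.2)).reverse
      = (PySem.List.enumerate a 0).map (fun p => (p.1 + 1) * wsum p.2) := by
  apply List.ext_getElem
  · simp [PySem.List.length_enumerate]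
  · intro j h1 h2
    have hl : j < a.length := by
      simpa [PySem.List.length_enumerate] using h2
    rw [List.getElem_reverse]
    simp only [List.getElem_map, PySem.List.getElem_enumerate, List.getElem_reverse,
      List.length_map, PySem.List.length_enumerate, List.length_reverse, word_value_eq]
    have hidx : a.length - 1 - (a.length - 1 - j) = j := by omega
    simp only [hidx]
    have hc : (a.length : Int) - (0 + ((a.length - 1 - j : Nat) : Int)) = 0 + (j : Int) + 1 := by
      omega
    rw [hc]

lemma enumerate_map {α β : Type} (f : α → β) :
    ∀ (xs : List α) (s : Int),
    PySem.List.enumerate (xs.map f) s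
      = (PySem.List.enumerate xs s).map (fun p => (p.1, f p.2)) := by
  intro xs
  induction xs with
  | nil => intro s; simp [PySem.List.enumerate_nil]
  | cons x xs ih => intro s; simp [PySem.List.enumerate_cons, ih]

-- ===== VERDICT (by name: the statement is the Claim_ definition above) =====
theorem name_value_spec : Claim_equal_name_value := by
  intro a _
  show name_value a = name_value_alt a
  rw [a_char, enumerate_map wsum a 0]
  unfold name_value_alt
  rw [rev_loop a.reverse (a.length : Int) 0 []]
  simp only [List.nil_append, add_zero]
  rw [rev_map_eq]
  simp [List.map_map, Function.comp]
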